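-- pv_equiv track=rewrite | github.com/chrismuntean/yolo-easyocr-system | Pursuit_Alert.py | temporal_redundancy_voting
-- ===== SOURCE A (Python) =====
-- from collections import Counter
--
-- def temporal_redundancy_voting(plate_strings):
--
--     # Determine the maximum length of the plates
--     max_length = max(len(plate) for plate in plate_strings)
--
--     # Initialize a list to hold the voted characters for each position
--     voted_characters = []
--
--     # Iterate through each position
--     for i in range(max_length):
--         char_counter = Counter()
--
--         # Count characters at the current position for each plate and count blanks
--         num_blanks = 0
--         for plate in plate_strings:
--             if i < len(plate):
--                 char_counter[plate[i]] += 1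
--             else:
--                 num_blanks += 1
--
--         # If blanks are the majority, stop adding more characters
--         if num_blanks > len(plate_strings) / 2:
--             break
--
--         # Find the most common character for this position
--         most_common_char, _ = char_counter.most_common(1)[0]
--         voted_characters.append(most_common_char)
--
--     # Join the characters to form the final voted plate
--     voted_plate = ''.join(voted_characters)
--     return voted_plate
-- ===== SOURCE B (Python) =====
-- # B: no per-position voting loop with a break; the kept length L is computed in
-- # closed form as the ceil(n/2)-th largest plate length (position i survives A's
-- # blank-majority cutoff iff at least ceil(n/2) plates are longer than i), then one
-- # flat pass over all plates builds a single (position, char) -> count dict, and one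
-- # pass over that dict picks each position's first-seen most common character.
-- def temporal_redundancy_voting(plate_strings):
--     n = len(plate_strings)
--     L = sorted((len(p) for p in plate_strings), reverse=True)[(n - 1) // 2]
--     counts = {}
--     for plate in plate_strings:
--         for i, c in enumerate(plate[:L]):
--             counts[i, c] = counts.get((i, c), 0) + 1
--     best = {}
--     for (i, c), cnt in counts.items():
--         if i not in best or cnt > best[i][1]:
--             best[i] = (c, cnt)
--     return ''.join(best[i][0] for i in range(L))
-- ===== Notes on version B (the rewrite author's own statement) =====
-- stated objective: alternative
-- what changed: B replaces A's per-position voting loop with its blank-majority break by a closed-form result length (the ceil(n/2)-th largest plate length, selected from the sorted lengths), one flat pass building a single (position, char) -> count dict over all plates, and one scan of that dict picking each position's first-seen most common character.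
-- outside the precondition, e.g. on temporal_redundancy_voting([]): A raises ValueError, B raises IndexError
import Mathlib
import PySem

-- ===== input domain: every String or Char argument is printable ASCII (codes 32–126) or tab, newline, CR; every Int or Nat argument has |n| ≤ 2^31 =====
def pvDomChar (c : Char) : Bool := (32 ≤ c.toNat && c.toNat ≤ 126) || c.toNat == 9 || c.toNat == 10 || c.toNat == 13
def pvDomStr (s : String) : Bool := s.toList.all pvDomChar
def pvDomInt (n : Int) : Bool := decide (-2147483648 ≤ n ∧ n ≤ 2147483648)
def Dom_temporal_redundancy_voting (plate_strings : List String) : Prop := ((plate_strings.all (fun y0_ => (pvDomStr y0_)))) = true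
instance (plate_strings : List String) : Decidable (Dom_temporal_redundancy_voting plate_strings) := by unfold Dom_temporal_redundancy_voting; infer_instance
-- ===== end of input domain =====

-- B computes the kept length in closed form (the ceil(n/2)-th largest plate length,
-- selected from the sorted lengths) instead of A's per-position break loop, counts all
-- (position, char) pairs in one flat dict pass, and picks each position's winner in one
-- scan of that dict; objective: alternative. Equivalence is proved on non-empty input
-- (A raises ValueError on []).


-- ===== PORT A =====
-- Counter.most_common(1)[0][0]: the first item with maximal count, in insertion order
def pvMostCommon (items : List (Char × Int)) : Option Char :=
  match items with
  | [] => none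
  | x :: rest => some ((rest.foldl (fun best y => if y.2 > best.2 then y else best) x).1)

-- one plate of A's inner loop: count plate[i] into the Counter, or count a blank
def pvVoteStep (i : Nat) (st : PySem.Dict Char Int × Int) (p : List Char) : PySem.Dict Char Int × Int :=
  if h : i < p.length then (st.1.modify p[i] 0 (· + 1), st.2) else (st.1, st.2 + 1)

-- A's 'for i in range(max_length)' loop with its break, fuel = remaining positions
def pvLoopA (plates : List (List Char)) (n : Int) : Nat → Nat → List Char
  | 0, _ => []
  | fuel + 1, i =>
      let st := plates.foldl (pvVoteStep i) (PySem.Dict.empty, 0)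
      -- 'num_blanks > len(plate_strings) / 2' : for integers, b > n/2 ⟺ 2*b > n (exact)
      if 2 * st.2 > n then []
      else
        match pvMostCommon st.1.items with
        | some c => c :: pvLoopA plates n fuel (i + 1)
        | none => []   -- most_common(1)[0] of an empty Counter; never reached when n ≥ 1

def temporal_redundancy_voting (plate_strings : List String) : String :=
  match PySem.List.max? (plate_strings.map (fun p => p.toList.length)) (fun x => x) with
  | none => ""   -- max() of an empty sequence raises ValueError: excluded by Pre_
  | some max_length =>
      String.mk (pvLoopA (plate_strings.map String.toList) (plate_strings.length : Int) max_length 0)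

-- ===== PORT B =====
-- 'counts[i, c] = counts.get((i, c), 0) + 1'
def pvCountStep (d : PySem.Dict (Int × Char) Int) (ic : Int × Char) : PySem.Dict (Int × Char) Int :=
  d.insert ic (d.getD ic 0 + 1)

-- 'if i not in best or cnt > best[i][1]: best[i] = (c, cnt)'
def pvBestStep (b : PySem.Dict Int (Char × Int)) (kv : (Int × Char) × Int) : PySem.Dict Int (Char × Int) :=
  match b.get? kv.1.1 with
  | none => b.insert kv.1.1 (kv.1.2, kv.2)
  | some pr => if kv.2 > pr.2 then b.insert kv.1.1 (kv.1.2, kv.2) else b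

def temporal_redundancy_voting_alt (plate_strings : List String) : String :=
  -- L = sorted((len(p) for p in plate_strings), reverse=True)[(n - 1) // 2]
  match PySem.List.pyGet?
      (PySem.List.sorted (plate_strings.map (fun p => (p.toList.length : Int))) (fun x => x) true)
      (PySem.Int.floordiv ((plate_strings.length : Int) - 1) 2) with
  | none => ""   -- IndexError on the empty list: excluded by Pre_
  | some L =>
      let counts := plate_strings.foldl
        (fun d p => (PySem.List.enumerate (PySem.List.slice p.toList none (some L))).foldl pvCountStep d)
        PySem.Dict.empty
      let best := counts.items.foldl pvBestStep PySem.Dict.empty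
      String.mk ((PySem.List.pyRange 0 L 1).filterMap (fun i => (best.get? i).map Prod.fst))

-- ===== PRECONDITION & SPEC =====
-- Pre_ excludes only the empty list, on which A raises ValueError (max() of an empty sequence).
def Pre_temporal_redundancy_voting (plate_strings : List String) : Prop := plate_strings ≠ []
instance (plate_strings : List String) : Decidable (Pre_temporal_redundancy_voting plate_strings) := by unfold Pre_temporal_redundancy_voting; infer_instance
def pvWitness_temporal_redundancy_voting : List String := ["AB1", "AB2", "CB1"]

def Spec_temporal_redundancy_voting (plate_strings : List String) (out : String) : Prop := out = temporal_redundancy_voting_alt plate_strings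
instance (plate_strings : List String) (out : String) : Decidable (Spec_temporal_redundancy_voting plate_strings out) := by unfold Spec_temporal_redundancy_voting; infer_instance

-- ===== CLAIM (what is proved, stated in full; the proofs are below) =====
def Claim_equal_temporal_redundancy_voting : Prop := ∀ (plate_strings : List String), Dom_temporal_redundancy_voting plate_strings → Pre_temporal_redundancy_voting plate_strings → Spec_temporal_redundancy_voting plate_strings (temporal_redundancy_voting plate_strings)

-- ===== LEMMAS AND PROOFS =====

-- the characters present at position i, in plate order
def pvChars (plates : List (List Char)) (i : Nat) : List Char :=
  plates.filterMap (fun p => p[i]?)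

-- the per-position winner both programs compute
def pvW (plates : List (List Char)) (i : Nat) : Option Char :=
  PySem.List.max? (PySem.List.dedup (pvChars plates i)) (fun c => (pvChars plates i).count c)

-- ---------- shared counting facts ----------
theorem pvFoldVoteStep (i : Nat) (plates : List (List Char)) (d : PySem.Dict Char Int) (b : Int) :
    plates.foldl (pvVoteStep i) (d, b)
      = (plates.foldl (fun d' p => if h : i < p.length then d'.modify p[i] 0 (· + 1) else d') d,
         b + ((plates.countP (fun p => decide (p.length ≤ i))) : Int)) := by
  induction plates generalizing d b with
  | nil => simp
  | cons p ps ih =>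
      simp only [List.foldl_cons, List.countP_cons]
      by_cases h : i < p.length
      · have hd : decide (p.length ≤ i) = false := by simp; omega
        simp only [pvVoteStep, dif_pos h, ih, hd, Bool.false_eq_true, if_false, Prod.mk.injEq]
        exact ⟨trivial, by push_cast; ring⟩
      · have hd : decide (p.length ≤ i) = true := by simp; omega
        simp only [pvVoteStep, dif_neg h, ih, hd, if_true, Prod.mk.injEq]
        exact ⟨trivial, by push_cast; ring⟩

theorem pvFoldModifyFilterMap (i : Nat) (plates : List (List Char)) (d : PySem.Dict Char Int) :
    plates.foldl (fun d' p => if h : i < p.length then d'.modify p[i] 0 (· + 1) else d') d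
      = (pvChars plates i).foldl (fun d' x => d'.modify x 0 (· + 1)) d := by
  induction plates generalizing d with
  | nil => simp [pvChars]
  | cons p ps ih =>
      by_cases h : i < p.length
      · simp only [pvChars, List.foldl_cons, List.filterMap_cons, dif_pos h,
          List.getElem?_eq_getElem h, List.foldl_cons]
        exact ih _
      · have hn : p[i]? = none := List.getElem?_eq_none (by omega)
        simp only [pvChars, List.foldl_cons, List.filterMap_cons, dif_neg h, hn]
        exact ih _

theorem pvBlanksLen (i : Nat) (plates : List (List Char)) :
    (pvChars plates i).length + plates.countP (fun p => decide (p.length ≤ i)) = plates.length := by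
  induction plates with
  | nil => simp [pvChars]
  | cons p ps ih =>
      by_cases h : i < p.length
      · have hd : decide (p.length ≤ i) = false := by simp; omega
        simp only [pvChars, List.filterMap_cons, List.getElem?_eq_getElem h, List.countP_cons, hd,
          Bool.false_eq_true, if_false, List.length_cons] at *
        omega
      · have hn : p[i]? = none := List.getElem?_eq_none (by omega)
        have hd : decide (p.length ≤ i) = true := by simp; omega
        simp only [pvChars, List.filterMap_cons, hn, List.countP_cons, hd, if_true,
          List.length_cons] at *
        omega

-- ---------- A: most_common over the Counter items ----------
theorem pvPairFold (cnt : Char → Nat) (t : List Char) : ∀ (k : Char),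
    ((t.map (fun c => (c, (cnt c : Int)))).foldl
        (fun best y => if y.2 > best.2 then y else best) (k, (cnt k : Int))).1
      = t.foldl (fun m x => if cnt m < cnt x then x else m) k := by
  induction t with
  | nil => intro k; rfl
  | cons c t ih =>
      intro k
      simp only [List.map_cons, List.foldl_cons, gt_iff_lt]
      by_cases h : cnt k < cnt c
      · have h' : ((cnt k : Int) < (cnt c : Int)) := by exact_mod_cast h
        rw [if_pos h', if_pos h]
        exact ih c
      · have h' : ¬ ((cnt k : Int) < (cnt c : Int)) := by exact_mod_cast h
        rw [if_neg h', if_neg h]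
        exact ih k

theorem pvFoldRel (cnt : Char → Nat) (t : List Char) : ∀ (k : Char),
    t.foldl (fun acc x => match acc with
        | none => some x
        | some m => if cnt m < cnt x then some x else some m) (some k)
      = some (t.foldl (fun m x => if cnt m < cnt x then x else m) k) := by
  induction t with
  | nil => intro k; rfl
  | cons c t ih =>
      intro k
      simp only [List.foldl_cons]
      by_cases h : cnt k < cnt c
      · rw [if_pos h, if_pos h]
        exact ih c
      · rw [if_neg h, if_neg h]
        exact ih k

theorem pvVoteEq (chars : List Char) :
    pvMostCommon ((PySem.Set.ofList chars).map (fun k => (k, (chars.count k : Int))))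
      = PySem.List.max? (PySem.List.dedup chars) (fun c => chars.count c) := by
  rw [PySem.List.dedup_eq_ofList]
  generalize PySem.Set.ofList chars = ks
  cases ks with
  | nil => rfl
  | cons k t =>
      have h1 : pvMostCommon ((k :: t).map (fun c => (c, (chars.count c : Int))))
          = some (t.foldl (fun m x => if chars.count m < chars.count x then x else m) k) := by
        simp only [List.map_cons, pvMostCommon]
        exact congrArg some (pvPairFold (fun c => chars.count c) t k)
      have hb : PySem.List.max? (k :: t) (fun c => chars.count c)
          = t.foldl (fun acc x => match acc with
              | none => some x
              | some m => if chars.count m < chars.count x then some x else some m) (some k) := by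
        simp only [PySem.List.max?, List.foldl_cons]
        congr 1
        funext acc x
        cases acc <;> rfl
      rw [h1, hb, pvFoldRel]

-- ---------- A's loop as a map over the kept positions ----------
theorem pvLenChars (i : Nat) (plates : List (List Char)) :
    (pvChars plates i).length = plates.countP (fun p => decide (i < p.length)) := by
  induction plates with
  | nil => simp [pvChars]
  | cons p ps ih =>
      by_cases h : i < p.length
      · simp only [pvChars, List.filterMap_cons, List.getElem?_eq_getElem h, List.countP_cons,
          decide_eq_true h, if_true, List.length_cons] at *
        omega
      · have hn : p[i]? = none := List.getElem?_eq_none (by omega)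
        have hd : decide (i < p.length) = false := by simp; omega
        simp only [pvChars, List.filterMap_cons, hn, List.countP_cons, hd,
          Bool.false_eq_true, if_false] at *
        omega

theorem pvLoopAEq (plates : List (List Char)) (n : Int) (LN : Nat)
    (hn : 1 ≤ n) (hlen : n = (plates.length : Int))
    (hbreak : ∀ i : Nat, (2 * ((plates.countP (fun p => decide (i < p.length))) : Int) ≥ n) ↔ i < LN) :
    ∀ (fuel i : Nat), LN ≤ i + fuel →
      pvLoopA plates n fuel i = (List.range' i (LN - i)).map (fun j => (pvW plates j).getD 'A') := by
  intro fuel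
  induction fuel with
  | zero =>
      intro i hi
      have h0 : LN - i = 0 := by omega
      simp [pvLoopA, h0]
  | succ fuel ih =>
      intro i hi
      have hsplit := pvFoldVoteStep i plates PySem.Dict.empty 0
      have h1 := pvBlanksLen i plates
      have h2 := pvLenChars i plates
      rw [h2] at h1
      by_cases hlt : i < LN
      · have hkeep : 2 * ((plates.countP (fun p => decide (i < p.length))) : Int) ≥ n :=
          (hbreak i).mpr hlt
        have hblank : ¬ (2 * ((0:Int) + ((plates.countP (fun p => decide (p.length ≤ i))) : Int)) > n) := by
          omega
        simp only [pvLoopA, hsplit]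
        rw [if_neg hblank]
        rw [pvFoldModifyFilterMap]
        have hcounter : (pvChars plates i).foldl (fun d x => d.modify x 0 (· + 1)) PySem.Dict.empty
            = PySem.Dict.counter (pvChars plates i) := rfl
        rw [hcounter, PySem.Dict.items_counter, pvVoteEq]
        have hne : pvChars plates i ≠ [] := by
          intro hc
          have : (pvChars plates i).length = 0 := by rw [hc]; rfl
          omega
        cases hwc : PySem.List.max? (PySem.List.dedup (pvChars plates i))
            (fun c => (pvChars plates i).count c) with
        | none =>
            exfalso
            have hd0 := (PySem.List.max?_eq_none_iff _ _).mp hwc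
            obtain ⟨x, hx⟩ := List.exists_mem_of_ne_nil _ hne
            have : x ∈ PySem.List.dedup (pvChars plates i) := (PySem.List.mem_dedup _ _).mpr hx
            rw [hd0] at this
            simp at this
        | some c =>
            have hrange : LN - i = (LN - (i + 1)) + 1 := by omega
            rw [hrange, List.range'_succ, List.map_cons]
            have hWc : pvW plates i = some c := hwc
            rw [hWc]
            show c :: pvLoopA plates n fuel (i + 1) = c :: _
            congr 1
            exact ih (i + 1) (by omega)
      · have hbig : 2 * ((0:Int) + ((plates.countP (fun p => decide (p.length ≤ i))) : Int)) > n := by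
          have hno : ¬ (2 * ((plates.countP (fun p => decide (i < p.length))) : Int) ≥ n) := by
            intro hyes
            exact hlt ((hbreak i).mp hyes)
          omega
        simp only [pvLoopA, hsplit]
        rw [if_pos hbig]
        have h0 : LN - i = 0 := by omega
        rw [h0]
        rfl

-- ---------- the selection bracket: position i survives iff i < L ----------
theorem pvDescCount (ds : List Int) (hp : ds.Pairwise (fun a b => b ≤ a)) (j : Nat)
    (hj : j < ds.length) (v : Int) :
    (j + 1 ≤ ds.countP (fun m => decide (v ≤ m))) ↔ v ≤ ds[j] := by
  have hmono : ∀ (p q : Nat) (hp2 : p < ds.length) (hq : q < ds.length), p ≤ q → ds[q] ≤ ds[p] := by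
    intro p q hp2 hq hpq
    rcases Nat.lt_or_ge p q with h | h
    · exact List.pairwise_iff_getElem.mp hp p q hp2 hq h
    · have hpq' : p = q := by omega
      subst hpq'
      rfl
  constructor
  · intro hc
    by_contra hv
    push_neg at hv
    have hdrop : List.countP (fun m => decide (v ≤ m)) (ds.drop j) = 0 := by
      rw [List.countP_eq_zero]
      intro a ha
      rw [List.mem_iff_getElem] at ha
      obtain ⟨k, hk, rfl⟩ := ha
      have hk' : k < ds.length - j := by simpa using hk
      rw [List.getElem_drop]
      simp only [decide_eq_true_eq]
      intro hle
      have hmk : ds[j + k] ≤ ds[j] := hmono j (j + k) (by omega) (by omega) (by omega)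
      omega
    have hsum : List.countP (fun m => decide (v ≤ m)) ds
        = List.countP (fun m => decide (v ≤ m)) (ds.take j)
          + List.countP (fun m => decide (v ≤ m)) (ds.drop j) := by
      conv_lhs => rw [← List.take_append_drop j ds]
      rw [List.countP_append]
    have htle : List.countP (fun m => decide (v ≤ m)) (ds.take j) ≤ j := by
      calc List.countP (fun m => decide (v ≤ m)) (ds.take j) ≤ (ds.take j).length :=
            List.countP_le_length
        _ ≤ j := by rw [List.length_take]; omega
    omega
  · intro hv
    have hlen : (ds.take (j + 1)).length = j + 1 := by rw [List.length_take]; omega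
    have htake : List.countP (fun m => decide (v ≤ m)) (ds.take (j + 1)) = (ds.take (j + 1)).length := by
      rw [List.countP_eq_length]
      intro a ha
      rw [List.mem_iff_getElem] at ha
      obtain ⟨k, hk, rfl⟩ := ha
      rw [List.getElem_take]
      simp only [decide_eq_true_eq]
      have hkj : k ≤ j := by rw [hlen] at hk; omega
      exact le_trans hv (hmono k j (by omega) hj hkj)
    have hsum : List.countP (fun m => decide (v ≤ m)) ds
        = List.countP (fun m => decide (v ≤ m)) (ds.take (j + 1))
          + List.countP (fun m => decide (v ≤ m)) (ds.drop (j + 1)) := by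
      conv_lhs => rw [← List.take_append_drop (j + 1) ds]
      rw [List.countP_append]
    omega

-- ---------- B: the flat counting pass ----------
theorem pvCountsEq (plate_strings : List String) (LN : Nat) :
    plate_strings.foldl
        (fun d p => (PySem.List.enumerate (p.toList.take LN)).foldl pvCountStep d)
        PySem.Dict.empty
      = PySem.Dict.counter
          ((plate_strings.map String.toList).flatMap (fun p => PySem.List.enumerate (p.take LN))) := by
  rw [← List.foldl_map (f := fun p : String => PySem.List.enumerate (p.toList.take LN))
    (g := fun d l => l.foldl pvCountStep d)]
  rw [← List.foldl_flatten]
  have hmap : plate_strings.map (fun p => PySem.List.enumerate (p.toList.take LN))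
      = (plate_strings.map String.toList).map (fun p => PySem.List.enumerate (p.take LN)) := by
    rw [List.map_map]
    rfl
  rw [hmap, ← List.flatMap_def]
  have hstep : pvCountStep = fun (d : PySem.Dict (Int × Char) Int) (x : Int × Char) =>
      d.insert x (d.getD x 0 + 1) := rfl
  rw [hstep]
  exact PySem.Dict.foldl_insert_getD_add_one_eq_counter _

-- ---------- B: the best pass reads each position independently ----------
theorem pvBestFold (l : List ((Int × Char) × Int)) (i : Int) : ∀ (b : PySem.Dict Int (Char × Int)),
    (l.foldl pvBestStep b).get? i
      = (l.filter (fun kv => kv.1.1 == i)).foldl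
          (fun acc kv => match acc with
            | none => some (kv.1.2, kv.2)
            | some pr => if kv.2 > pr.2 then some (kv.1.2, kv.2) else some pr) (b.get? i) := by
  induction l with
  | nil => intro b; rfl
  | cons kv l ih =>
      intro b
      by_cases h : kv.1.1 = i
      · rw [List.foldl_cons, List.filter_cons_of_pos (by simp [h]), List.foldl_cons, ih]
        congr 1
        subst h
        unfold pvBestStep
        cases hb : b.get? kv.1.1 with
        | none => simp [PySem.Dict.get?_insert_self]
        | some pr =>
            by_cases hgt : kv.2 > pr.2
            · simp [hgt, PySem.Dict.get?_insert_self]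
            · simp [hgt, hb]
      · rw [List.foldl_cons, List.filter_cons_of_neg (by simp [h]), ih]
        congr 1
        unfold pvBestStep
        cases hb : b.get? kv.1.1 with
        | none => exact PySem.Dict.get?_insert_of_ne _ _ (fun hh => h hh.symm)
        | some pr =>
            by_cases hgt : kv.2 > pr.2
            · simp only [hgt, if_true]
              exact PySem.Dict.get?_insert_of_ne _ _ (fun hh => h hh.symm)
            · simp [hgt]

-- ---------- first-seen dedup commutes with filter and injective map ----------
theorem pvOfListFilter {α : Type} [BEq α] [LawfulBEq α] (p : α → Bool) (xs : List α) :
    (PySem.Set.ofList xs).filter p = PySem.Set.ofList (xs.filter p) := by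
  induction xs with
  | nil => rfl
  | cons x xs ih =>
      rw [PySem.Set.ofList_cons]
      by_cases hx : p x = true
      · rw [List.filter_cons_of_pos hx, List.filter_cons_of_pos hx, PySem.Set.ofList_cons]
        congr 1
        simp only [PySem.Set.discard]
        rw [List.filter_filter, ← ih, List.filter_filter]
        exact List.filter_congr (fun a _ => Bool.and_comm _ _)
      · rw [List.filter_cons_of_neg hx, List.filter_cons_of_neg hx]
        simp only [PySem.Set.discard]
        rw [List.filter_filter, ← ih]
        apply List.filter_congr
        intro a _
        by_cases hax : a = x
        · rw [hax]
          have hx' : p x = false := by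
            cases hpxv : p x with
            | true => exact absurd hpxv hx
            | false => rfl
          simp [hx']
        · simp [hax]

theorem pvOfListMap {α β : Type} [BEq α] [LawfulBEq α] [BEq β] [LawfulBEq β]
    (f : α → β) (hf : Function.Injective f) (xs : List α) :
    PySem.Set.ofList (xs.map f) = (PySem.Set.ofList xs).map f := by
  induction xs with
  | nil => rfl
  | cons x xs ih =>
      rw [List.map_cons, PySem.Set.ofList_cons, PySem.Set.ofList_cons, List.map_cons]
      congr 1
      rw [ih]
      simp only [PySem.Set.discard]
      rw [List.filter_map]
      congr 1
      apply List.filter_congr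
      intro a _
      simp only [Function.comp]
      by_cases hax : a = x
      · subst hax; simp
      · have : ¬ (f a = f x) := fun hh => hax (hf hh)
        simp [hax, this]

-- ---------- filtering one position out of the flat tagged list ----------
theorem pvFilterBeqNodup {α : Type} [BEq α] [LawfulBEq α] (l : List α) (hl : l.Nodup) (v : α) :
    l.filter (fun x => x == v) = if v ∈ l then [v] else [] := by
  induction l with
  | nil => simp
  | cons x t ih =>
      have hx : x ∉ t := (List.nodup_cons.mp hl).1
      have ht : t.Nodup := (List.nodup_cons.mp hl).2
      by_cases h : x = v
      · subst h
        rw [List.filter_cons_of_pos (by simp)]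
        have hnone : t.filter (fun y => y == x) = [] := by
          rw [List.filter_eq_nil_iff]
          intro a ha
          simp only [beq_iff_eq]
          intro hax
          exact hx (hax ▸ ha)
        simp [hnone]
      · rw [List.filter_cons_of_neg (by simp [h]), ih ht]
        have hvx : ¬ (v = x) := fun hh => h hh.symm
        by_cases hv : v ∈ t
        · simp [hv, List.mem_cons]
        · have hnx : v ∉ x :: t := by
            rw [List.mem_cons]
            push_neg
            exact ⟨hvx, hv⟩
          simp [hv, hnx]

theorem pvEnumFilter (xs : List Char) (iN : Nat) :
    (PySem.List.enumerate xs).filter (fun kv => kv.1 == (iN : Int))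
      = (xs[iN]?.map (fun c => ((iN : Int), c))).toList := by
  rw [PySem.List.enumerate_eq_map_pyRange xs 'A', List.filter_map]
  have hcomp : ((fun kv : Int × Char => kv.1 == (iN : Int))
      ∘ (fun j => (j, PySem.List.pyGetD xs j 'A'))) = fun j => j == (iN : Int) := rfl
  rw [hcomp]
  rw [pvFilterBeqNodup _ (PySem.List.nodup_pyRange_one _ _) (iN : Int)]
  by_cases h : iN < xs.length
  · have hmem : (iN : Int) ∈ PySem.List.pyRange 0 (PySem.List.len xs) 1 := by
      rw [PySem.List.mem_pyRange_one]
      constructor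
      · exact_mod_cast Nat.zero_le iN
      · simp only [PySem.List.len_eq]
        exact_mod_cast h
    rw [if_pos hmem]
    simp [List.getElem?_eq_getElem h, PySem.List.pyGetD_natCast, List.getD,
      List.getElem?_eq_getElem h]
  · have hmem : (iN : Int) ∉ PySem.List.pyRange 0 (PySem.List.len xs) 1 := by
      rw [PySem.List.mem_pyRange_one]
      simp only [PySem.List.len_eq]
      push_neg
      intro _
      exact_mod_cast Nat.le_of_not_lt h
    rw [if_neg hmem]
    simp [List.getElem?_eq_none (Nat.le_of_not_lt h)]

theorem pvTagFilter (plates : List (List Char)) (LN iN : Nat) :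
    (plates.flatMap (fun p => PySem.List.enumerate (p.take LN))).filter
        (fun kv => kv.1 == (iN : Int))
      = (plates.filterMap (fun p => (p.take LN)[iN]?)).map (fun c => ((iN : Int), c)) := by
  induction plates with
  | nil => rfl
  | cons p ps ih =>
      rw [List.flatMap_cons, List.filter_append, ih, List.filterMap_cons]
      rw [pvEnumFilter (p.take LN) iN]
      cases h : (p.take LN)[iN]? with
      | none => simp [h]
      | some c => simp [h]

theorem pvCharsTake (plates : List (List Char)) (LN iN : Nat) (h : iN < LN) :
    plates.filterMap (fun p => (p.take LN)[iN]?) = pvChars plates iN := by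
  unfold pvChars
  simp only [List.getElem?_take, if_pos h]

theorem pvFoldBestPair (cnt : Char → Nat) (i : Int) (t : List Char) : ∀ (k : Char),
    (t.map (fun c => ((i, c), (cnt c : Int)))).foldl
        (fun acc kv => match acc with
          | none => some (kv.1.2, kv.2)
          | some pr => if kv.2 > pr.2 then some (kv.1.2, kv.2) else some pr)
        (some (k, (cnt k : Int)))
      = some (t.foldl (fun m x => if cnt m < cnt x then x else m) k,
              (cnt (t.foldl (fun m x => if cnt m < cnt x then x else m) k) : Int)) := by
  induction t with
  | nil => intro k; rfl
  | cons c t ih =>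
      intro k
      simp only [List.map_cons, List.foldl_cons, gt_iff_lt]
      by_cases h : cnt k < cnt c
      · rw [if_pos (by exact_mod_cast h : ((cnt k : Int) < (cnt c : Int))), if_pos h]
        exact ih c
      · rw [if_neg (by exact_mod_cast h : ¬ ((cnt k : Int) < (cnt c : Int))), if_neg h]
        exact ih k

-- ---------- B's winner at one position ----------
theorem pvBestEq (chars : List Char) (i : Int) :
    (((PySem.Set.ofList chars).map (fun c => ((i, c), (chars.count c : Int)))).foldl
        (fun acc kv => match acc with
          | none => some (kv.1.2, kv.2)
          | some pr => if kv.2 > pr.2 then some (kv.1.2, kv.2) else some pr)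
        none).map Prod.fst
      = PySem.List.max? (PySem.List.dedup chars) (fun c => chars.count c) := by
  rw [PySem.List.dedup_eq_ofList]
  generalize PySem.Set.ofList chars = ks
  cases ks with
  | nil => rfl
  | cons k t =>
      simp only [List.map_cons, List.foldl_cons]
      rw [pvFoldBestPair (fun c => chars.count c) i t k]
      have hb : PySem.List.max? (k :: t) (fun c => chars.count c)
          = t.foldl (fun acc x => match acc with
              | none => some x
              | some m => if chars.count m < chars.count x then some x else some m) (some k) := by
        simp only [PySem.List.max?, List.foldl_cons]
        congr 1
        funext acc x
        cases acc <;> rfl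
      rw [hb, pvFoldRel]
      rfl

-- ---------- filterMap of a some-valued function is a map ----------
theorem pvFilterMapSome {α β : Type} (l : List α) (f : α → Option β) (d : β)
    (h : ∀ x ∈ l, (f x).isSome) :
    l.filterMap f = l.map (fun x => (f x).getD d) := by
  induction l with
  | nil => rfl
  | cons x l ih =>
      have hx := h x List.mem_cons_self
      obtain ⟨y, hy⟩ := Option.isSome_iff_exists.mp hx
      rw [List.filterMap_cons, hy, List.map_cons]
      rw [ih (fun z hz => h z (List.mem_cons_of_mem _ hz))]
      simp [hy]

theorem pvFinal (F W : Nat → Option Char) (n : Nat)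
    (hFW : ∀ k, k < n → F k = W k) (hW : ∀ k, k < n → (W k).isSome) :
    (List.range n).filterMap F = (List.range n).map (fun k => (W k).getD 'A') := by
  have h1 : ∀ (l : List Nat), (∀ k ∈ l, F k = W k) → l.filterMap F = l.filterMap W := by
    intro l
    induction l with
    | nil => intro _; rfl
    | cons x t ih =>
        intro h
        rw [List.filterMap_cons, List.filterMap_cons, h x List.mem_cons_self,
          ih (fun z hz => h z (List.mem_cons_of_mem _ hz))]
  rw [h1 (List.range n) (fun k hk => hFW k (List.mem_range.mp hk))]
  exact pvFilterMapSome _ _ 'A' (fun x hx => hW x (List.mem_range.mp hx))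

-- ===== VERDICT (by name: the statement is the Claim_ definition above) =====
theorem temporal_redundancy_voting_spec : Claim_equal_temporal_redundancy_voting := by
  intro ps hdom hpre
  have hne : ps ≠ [] := hpre
  have hnpos : 0 < ps.length := List.length_pos_iff.mpr hne
  show temporal_redundancy_voting ps = temporal_redundancy_voting_alt ps
  rw [temporal_redundancy_voting, temporal_redundancy_voting_alt]
  set ds := PySem.List.sorted (ps.map (fun p => (p.toList.length : Int))) (fun x => x) true with hds
  have hdslen : ds.length = ps.length := by
    rw [hds, PySem.List.length_sorted, List.length_map]
  have hperm : ds.Perm (ps.map (fun p => (p.toList.length : Int))) := PySem.List.sorted_perm _ _ _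
  have hpair : ds.Pairwise (fun a b => b ≤ a) := PySem.List.sorted_pairwise_rev _ _
  have hjlt : (ps.length - 1) / 2 < ds.length := by rw [hdslen]; omega
  have hidx : PySem.Int.floordiv ((ps.length : Int) - 1) 2 = (((ps.length - 1) / 2 : Nat) : Int) := by
    have h1 : ((ps.length : Int) - 1) = ((ps.length - 1 : Nat) : Int) := by
      have := hnpos
      push_cast
      omega
    rw [h1]
    exact_mod_cast PySem.Int.floordiv_natCast (ps.length - 1) 2
  have hget : PySem.List.pyGet? ds (PySem.Int.floordiv ((ps.length : Int) - 1) 2)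
      = some ds[(ps.length - 1) / 2] := by
    rw [hidx, PySem.List.pyGet?_natCast, List.getElem?_eq_getElem hjlt]
  have hLmem : ds[(ps.length - 1) / 2] ∈ ps.map (fun p => (p.toList.length : Int)) :=
    hperm.mem_iff.mp (List.getElem_mem hjlt)
  obtain ⟨s0, hs0, hs0L⟩ := List.mem_map.mp hLmem
  have hL0 : 0 ≤ ds[(ps.length - 1) / 2] := by rw [← hs0L]; positivity
  simp only [hget, PySem.List.slice_to (hb := hL0)]
  set LN := (ds[(ps.length - 1) / 2]).toNat with hLN
  have hLNcast : (LN : Int) = ds[(ps.length - 1) / 2] := Int.toNat_of_nonneg hL0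
  -- the survival bracket: position i is kept by A exactly when i < LN
  have hcount : ∀ i : Nat, ((ps.map String.toList).countP (fun p => decide (i < p.length)))
      = ds.countP (fun m => decide ((i : Int) + 1 ≤ m)) := by
    intro i
    rw [hperm.countP_eq, List.countP_map, List.countP_map]
    apply List.countP_congr
    intro s _
    simp only [Function.comp_apply, decide_eq_true_eq]
    constructor <;> (intro hh; omega)
  have hbr : ∀ i : Nat,
      (2 * (((ps.map String.toList).countP (fun p => decide (i < p.length))) : Int) ≥ (ps.length : Int))
        ↔ i < LN := by
    intro i
    rw [hcount i]
    have hdc := pvDescCount ds hpair ((ps.length - 1) / 2) hjlt ((i : Int) + 1)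
    constructor
    · intro h2
      have hcnt : (ps.length - 1) / 2 + 1 ≤ ds.countP (fun m => decide ((i : Int) + 1 ≤ m)) := by
        omega
      have := hdc.mp hcnt
      omega
    · intro hi
      have hile : (i : Int) + 1 ≤ ds[(ps.length - 1) / 2] := by omega
      have := hdc.mpr hile
      omega
  -- each kept position has a winner
  have hsome : ∀ i : Nat, i < LN → (pvW (ps.map String.toList) i).isSome := by
    intro i hi
    have h2 := (hbr i).mpr hi
    have hlc := pvLenChars i (ps.map String.toList)
    have hnonempty : pvChars (ps.map String.toList) i ≠ [] := by
      intro hc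
      rw [hc] at hlc
      simp only [List.length_nil] at hlc
      omega
    unfold pvW
    cases hwc : PySem.List.max? (PySem.List.dedup (pvChars (ps.map String.toList) i))
        (fun c => (pvChars (ps.map String.toList) i).count c) with
    | none =>
        exfalso
        have hd0 := (PySem.List.max?_eq_none_iff _ _).mp hwc
        obtain ⟨x, hx⟩ := List.exists_mem_of_ne_nil _ hnonempty
        have hxm : x ∈ PySem.List.dedup (pvChars (ps.map String.toList) i) :=
          (PySem.List.mem_dedup _ _).mpr hx
        rw [hd0] at hxm
        simp at hxm
    | some c => rfl
  -- B: the flat counting dict is the counter of the tagged list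
  rw [pvCountsEq ps LN, PySem.Dict.items_counter]
  -- B: the winner extracted at each kept position
  have hwin : ∀ i : Nat, i < LN →
      (((((PySem.Set.ofList ((ps.map String.toList).flatMap (fun p => PySem.List.enumerate (p.take LN)))).map
            (fun k => (k, (((ps.map String.toList).flatMap (fun p => PySem.List.enumerate (p.take LN))).count k : Int)))).foldl
          pvBestStep PySem.Dict.empty).get? (i : Int)).map Prod.fst)
        = pvW (ps.map String.toList) i := by
    intro i hi
    rw [pvBestFold]
    rw [PySem.Dict.get?_empty]
    rw [List.filter_map]
    have hcomp : ((fun kv : (Int × Char) × Int => kv.1.1 == (i : Int))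
        ∘ (fun k : Int × Char => (k, (((ps.map String.toList).flatMap (fun p => PySem.List.enumerate (p.take LN))).count k : Int))))
        = fun k : Int × Char => k.1 == (i : Int) := rfl
    rw [hcomp, pvOfListFilter, pvTagFilter, pvCharsTake _ _ _ hi]
    have htag : Function.Injective (fun c : Char => ((i : Int), c)) := fun a b h => congrArg Prod.snd h
    rw [pvOfListMap _ htag, List.map_map]
    have hTc : ∀ c : Char,
        ((ps.map String.toList).flatMap (fun p => PySem.List.enumerate (p.take LN))).count ((i : Int), c)
          = (pvChars (ps.map String.toList) i).count c := by
      intro c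
      have h1 : List.count ((i : Int), c)
            (((ps.map String.toList).flatMap (fun p => PySem.List.enumerate (p.take LN))).filter
              (fun kv => kv.1 == (i : Int)))
          = List.count ((i : Int), c)
            ((ps.map String.toList).flatMap (fun p => PySem.List.enumerate (p.take LN))) :=
        List.count_filter (by simp)
      rw [← h1, pvTagFilter, pvCharsTake _ _ _ hi]
      exact List.count_map_of_injective _ _ htag c
    have hmapeq : ((PySem.Set.ofList (pvChars (ps.map String.toList) i)).map
          ((fun k : Int × Char => (k, (((ps.map String.toList).flatMap (fun p => PySem.List.enumerate (p.take LN))).count k : Int)))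
            ∘ (fun c : Char => ((i : Int), c))))
        = (PySem.Set.ofList (pvChars (ps.map String.toList) i)).map
            (fun c => (((i : Int), c), ((pvChars (ps.map String.toList) i).count c : Int))) := by
      apply List.map_congr_left
      intro c _
      simp only [Function.comp_apply]
      rw [hTc c]
    rw [hmapeq, pvBestEq]
    rfl
  -- B: the output positions
  have hrange : PySem.List.pyRange 0 ds[(ps.length - 1) / 2] 1
      = List.map (fun k : Nat => (k : Int)) (List.range LN) := by
    rw [PySem.List.pyRange_one]
    have h0 : (ds[(ps.length - 1) / 2] - 0).toNat = LN := by omega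
    rw [h0]
    apply List.map_congr_left
    intro k _
    omega
  rw [hrange, List.filterMap_map]
  -- A: evaluate the max-length match
  cases hm : PySem.List.max? (ps.map fun p => p.toList.length) (fun x => x) with
  | none =>
      exfalso
      have h0 := (PySem.List.max?_eq_none_iff _ _).mp hm
      simp only [List.map_eq_nil_iff] at h0
      exact hne h0
  | some maxLen =>
      refine congrArg String.mk ?_
      have hfuel : LN ≤ 0 + maxLen := by
        have hmax := PySem.List.max?_isMax hm (s0.toList.length)
            (List.mem_map.mpr ⟨s0, hs0, rfl⟩)
        have : LN = s0.toList.length := by omega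
        omega
      rw [pvLoopAEq (ps.map String.toList) (ps.length : Int) LN
        (by exact_mod_cast hnpos) (by rw [List.length_map]) hbr maxLen 0 hfuel]
      rw [Nat.sub_zero, ← List.range_eq_range']
      refine (pvFinal _ _ LN ?_ ?_).symm
      · intro k hk
        simp only [Function.comp_apply]
        exact hwin k hk
      · intro k hk
        exact hsome k hk
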